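-- pv_equiv track=rewrite | github.com/royw/taskfile_help | src/taskfile_help/output.py | _group_results_by_namespace
-- ===== SOURCE A (Python) =====
-- def _group_results_by_namespace(
--
--     results: list[tuple[str, str, str, str, str]],
-- ) -> dict[str, list[tuple[str, str, str, str]]]:
--     """Group search results by namespace."""
--     grouped: dict[str, list[tuple[str, str, str, str]]] = {}
--     for namespace, group, task_name, description, match_type in results:
--         if namespace not in grouped:
--             grouped[namespace] = []
--         grouped[namespace].append((group, task_name, description, match_type))
--     return grouped
-- ===== SOURCE B (Python) =====
-- def _group_results_by_namespace(
--     results: list[tuple[str, str, str, str, str]],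
-- ) -> dict[str, list[tuple[str, str, str, str]]]:
--     """Group search results by namespace."""
--     return {
--         ns: [(g, t, d, m) for (n, g, t, d, m) in results if n == ns]
--         for ns in dict.fromkeys(n for n, _g, _t, _d, _m in results)
--     }
-- ===== Notes on version B (the rewrite author's own statement) =====
-- stated objective: simpler
-- what changed: Replaces the incremental dict-building loop (membership test, empty-list init, append) by a dict comprehension over the first-occurrence-deduplicated namespaces, each key's list built in one filtering pass over results.
import Mathlib
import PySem

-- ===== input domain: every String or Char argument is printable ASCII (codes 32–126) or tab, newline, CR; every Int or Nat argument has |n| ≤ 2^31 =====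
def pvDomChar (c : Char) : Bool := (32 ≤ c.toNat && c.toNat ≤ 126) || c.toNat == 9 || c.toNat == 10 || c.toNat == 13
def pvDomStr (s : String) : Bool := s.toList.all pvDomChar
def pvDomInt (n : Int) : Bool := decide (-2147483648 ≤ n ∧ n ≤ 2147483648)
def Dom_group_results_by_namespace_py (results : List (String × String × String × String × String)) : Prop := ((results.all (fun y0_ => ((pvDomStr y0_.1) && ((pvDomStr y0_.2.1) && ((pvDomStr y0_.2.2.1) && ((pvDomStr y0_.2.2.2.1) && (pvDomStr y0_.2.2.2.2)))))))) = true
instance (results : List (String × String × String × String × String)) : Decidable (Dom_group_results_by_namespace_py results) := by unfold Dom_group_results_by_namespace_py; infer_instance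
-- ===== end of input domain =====

-- B replaces A's incremental dict-building loop by a dict comprehension over the
-- deduplicated namespaces with one filtering pass per namespace (objective: simpler).

-- ===== PORT A =====
def group_results_by_namespace_py (results : List (String × String × String × String × String)) : List (String × List (String × String × String × String)) :=
  (results.foldl (fun grouped r =>
      -- 'if namespace not in grouped: grouped[namespace] = []', then
      -- 'grouped[namespace].append((group, task_name, description, match_type))'
      (if grouped.contains r.1 then grouped else grouped.insert r.1 []).modify
        r.1 [] (fun l => l ++ [(r.2.1, r.2.2.1, r.2.2.2.1, r.2.2.2.2)]))
      PySem.Dict.empty).items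

-- ===== PORT B =====
def group_results_by_namespace_py_alt (results : List (String × String × String × String × String)) : List (String × List (String × String × String × String)) :=
  (PySem.List.dedup (results.map (·.1))).map (fun ns =>
    (ns, (results.filter (fun r => r.1 == ns)).map (fun r => (r.2.1, r.2.2.1, r.2.2.2.1, r.2.2.2.2))))

-- ===== PRECONDITION & SPEC =====
def Spec_group_results_by_namespace_py (results : List (String × String × String × String × String)) (out : List (String × List (String × String × String × String))) : Prop := out = group_results_by_namespace_py_alt results
instance (results : List (String × String × String × String × String)) (out : List (String × List (String × String × String × String))) : Decidable (Spec_group_results_by_namespace_py results out) := by unfold Spec_group_results_by_namespace_py; infer_instance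

-- ===== CLAIM (what is proved, stated in full; the proofs are below) =====
def Claim_equal_group_results_by_namespace_py : Prop := ∀ (results : List (String × String × String × String × String)), Dom_group_results_by_namespace_py results → Spec_group_results_by_namespace_py results (group_results_by_namespace_py results)

-- ===== LEMMAS AND PROOFS =====

-- A's "if absent insert []; then append" step is Dict.modify with default [].
theorem pvStepEq (d : PySem.Dict String (List (String × String × String × String)))
    (k : String) (v : String × String × String × String) :
    (if d.contains k then d else d.insert k []).modify k [] (fun l => l ++ [v])
      = d.modify k [] (fun l => l ++ [v]) := by
  by_cases h : d.contains k = true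
  · simp [h]
  · have h' : d.contains k = false := by simpa using h
    simp only [h', Bool.false_eq_true, if_false, PySem.Dict.modify,
      PySem.Dict.getD_insert_self, PySem.Dict.insert_insert_self]
    rw [PySem.Dict.getD_of_not_contains d [] h']

-- ===== VERDICT (by name: the statement is the Claim_ definition above) =====
theorem group_results_by_namespace_py_spec : Claim_equal_group_results_by_namespace_py := by
  intro results _
  unfold Spec_group_results_by_namespace_py group_results_by_namespace_py group_results_by_namespace_py_alt
  rw [PySem.List.foldl_congr_mem results _
      (fun d r => PySem.Dict.modify d r.1 [] (fun l => l ++ [(r.2.1, r.2.2.1, r.2.2.2.1, r.2.2.2.2)]))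
      PySem.Dict.empty (fun d r _ => pvStepEq d r.1 _)]
  have hmap : results.foldl (fun d r =>
        PySem.Dict.modify d r.1 [] (fun l => l ++ [(r.2.1, r.2.2.1, r.2.2.2.1, r.2.2.2.2)]))
        PySem.Dict.empty
      = (results.map (fun r => (r.1, (r.2.1, r.2.2.1, r.2.2.2.1, r.2.2.2.2)))).foldl
          (fun d p => PySem.Dict.modify d p.1 [] (fun l => l ++ [p.2])) PySem.Dict.empty := by
    rw [List.foldl_map]
  rw [hmap]
  have hnd : ((results.map (fun r => (r.1, (r.2.1, r.2.2.1, r.2.2.2.1, r.2.2.2.2)))).foldl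
      (fun d p => PySem.Dict.modify d p.1 [] (fun l => l ++ [p.2])) PySem.Dict.empty).keys.Nodup := by
    exact PySem.Dict.nodup_keys_foldl_modify_key _
      (fun (p : String × (String × String × String × String)) => p.1) []
      (fun _ p l => l ++ [p.2]) _ (by simp [PySem.Dict.keys_empty])
  rw [PySem.Dict.items_eq_map_keys _ hnd []]
  have hkeys : ((results.map (fun r => (r.1, (r.2.1, r.2.2.1, r.2.2.2.1, r.2.2.2.2)))).foldl
      (fun d p => PySem.Dict.modify d p.1 [] (fun l => l ++ [p.2])) PySem.Dict.empty).keys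
      = PySem.List.dedup (results.map (fun r => r.1)) := by
    rw [PySem.Dict.keys_foldl_modify_key _
      (fun (p : String × (String × String × String × String)) => p.1) []
      (fun _ p l => l ++ [p.2])]
    simp [PySem.Dict.keys_empty, PySem.List.dedup, PySem.Set.update, PySem.Set.ofList,
      PySem.Set.empty]
  rw [hkeys]
  refine List.map_congr_left (fun k _ => ?_)
  have hget := PySem.Dict.getD_foldl_modify_append
    (results.map (fun r => (r.1, (r.2.1, r.2.2.1, r.2.2.2.1, r.2.2.2.2)))) PySem.Dict.empty k
  rw [hget, PySem.Dict.getD_empty]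
  simp
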